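-- pv_equiv track=rewrite | github.com/commanderarminarlert/fpl | transfer_optimizer.py | _identify_blank_gameweeks
-- ===== SOURCE A (Python) =====
-- from typing import Dict, List, Tuple, Optional, Set
--
-- def _identify_blank_gameweeks(fixture_analysis: Dict, current_gw: int) -> List[int]:
--     """Identify confirmed and likely blank gameweeks"""
--     blank_gws = []
--
--     for gw, data in fixture_analysis.items():
--         # Blank gameweek detection
--         if data['total_fixtures'] < 5:
--             blank_gws.append(gw)
--
--     # Check for FA Cup/European fixture clashes (typically GW18, GW28-29)
--     typical_blank_periods = [18, 28, 29]
--     for gw in typical_blank_periods: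
--         if gw >= current_gw and gw not in blank_gws and gw in fixture_analysis:
--             if fixture_analysis[gw]['total_fixtures'] < 8:
--                 blank_gws.append(gw)
--
--     return sorted(blank_gws)
-- ===== SOURCE B (Python) =====
-- def _identify_blank_gameweeks(fixture_analysis, current_gw):
--     """Identify confirmed and likely blank gameweeks.
--
--     Strategy: sort the gameweek keys first, then make one ordered scan comparing
--     each gameweek's fixture count against its own threshold (8 for a typical
--     blank period 18/28/29 not yet past, 5 otherwise); the output is built
--     already in ascending order, so no final sort and no dedup check is needed.
--     """
--     def threshold(gw):
--         if gw in (18, 28, 29) and gw >= current_gw: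
--             return 8
--         return 5
--
--     result = []
--     for gw in sorted(fixture_analysis):
--         if fixture_analysis[gw]['total_fixtures'] < threshold(gw):
--             result.append(gw)
--     return result
-- ===== Notes on version B (the rewrite author's own statement) =====
-- stated objective: alternative
-- what changed: B inverts the structure: instead of A's collect-then-sort with two staged loops and a 'not in blank_gws' membership scan, B sorts the gameweek keys up front and makes one ordered scan comparing each gameweek against a per-gameweek threshold function (8 for pending typical-blank weeks 18/28/29, else 5), emitting the result already in ascending order with no final sort and no dedup.
-- outside the precondition, e.g. on _identify_blank_gameweeks({18: {}}, 1): A raises KeyError, B raises KeyError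
import Mathlib
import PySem

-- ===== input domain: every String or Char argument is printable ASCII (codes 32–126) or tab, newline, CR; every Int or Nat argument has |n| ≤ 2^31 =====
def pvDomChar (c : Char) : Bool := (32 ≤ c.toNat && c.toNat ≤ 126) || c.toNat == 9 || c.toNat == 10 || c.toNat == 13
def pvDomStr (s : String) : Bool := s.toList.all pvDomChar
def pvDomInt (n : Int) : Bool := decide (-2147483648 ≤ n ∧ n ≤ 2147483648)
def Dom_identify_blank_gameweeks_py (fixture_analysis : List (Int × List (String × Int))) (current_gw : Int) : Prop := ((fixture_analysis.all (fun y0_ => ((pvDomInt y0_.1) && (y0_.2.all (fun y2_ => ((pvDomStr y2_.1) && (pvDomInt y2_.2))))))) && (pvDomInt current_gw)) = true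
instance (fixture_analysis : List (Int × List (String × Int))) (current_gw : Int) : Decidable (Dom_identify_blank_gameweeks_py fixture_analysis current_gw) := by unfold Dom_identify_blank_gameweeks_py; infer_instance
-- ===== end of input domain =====

-- ===== PORT A =====
-- B sorts the keys first and scans once against a per-gameweek threshold; proved equal to A under Pre_ (every value dict has 'total_fixtures').

-- data['total_fixtures'] on an inner dict (Pre_ guarantees the key is present, so the getD default is never used)
def pvTF (data : List (String × Int)) : Int :=
  ((PySem.Dict.ofList data).get? "total_fixtures").getD 0

-- fixture_analysis[gw]['total_fixtures'] (only evaluated where gw is a key of fixture_analysis)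
def pvLookupTF (fixture_analysis : List (Int × List (String × Int))) (gw : Int) : Int :=
  (((PySem.Dict.ofList fixture_analysis).get? gw).map pvTF).getD 0

def identify_blank_gameweeks_py (fixture_analysis : List (Int × List (String × Int))) (current_gw : Int) : List Int :=
  let blank_gws : List Int :=
    (PySem.Dict.ofList fixture_analysis).items.foldl
      (fun acc p => if pvTF p.2 < 5 then acc ++ [p.1] else acc) []
  let blank_gws : List Int :=
    ([18, 28, 29] : List Int).foldl
      (fun acc gw =>
        if current_gw ≤ gw ∧ ¬ gw ∈ acc ∧ (PySem.Dict.ofList fixture_analysis).contains gw then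
          if pvLookupTF fixture_analysis gw < 8 then acc ++ [gw] else acc
        else acc)
      blank_gws
  PySem.List.sorted blank_gws (fun x => x) false

-- ===== PORT B =====
-- threshold(gw): 8 for a typical blank period (18/28/29) not yet past, else 5
def pvThreshold (current_gw gw : Int) : Int :=
  if (gw == 18 || gw == 28 || gw == 29) && decide (current_gw ≤ gw) then 8 else 5

def identify_blank_gameweeks_py_alt (fixture_analysis : List (Int × List (String × Int))) (current_gw : Int) : List Int :=
  (PySem.List.sorted (PySem.Dict.ofList fixture_analysis).keys (fun x => x) false).foldl
    (fun result gw =>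
      if pvLookupTF fixture_analysis gw < pvThreshold current_gw gw then result ++ [gw] else result)
    []

-- ===== PRECONDITION & SPEC =====
-- Pre_ excludes inputs where some value dict lacks the key 'total_fixtures', on which A raises KeyError.
def Pre_identify_blank_gameweeks_py (fixture_analysis : List (Int × List (String × Int))) (current_gw : Int) : Prop :=
  ∀ p ∈ (PySem.Dict.ofList fixture_analysis).items,
    ((PySem.Dict.ofList p.2).get? "total_fixtures").isSome = true
instance (fixture_analysis : List (Int × List (String × Int))) (current_gw : Int) : Decidable (Pre_identify_blank_gameweeks_py fixture_analysis current_gw) := by unfold Pre_identify_blank_gameweeks_py; infer_instance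

def pvWitness_identify_blank_gameweeks_py : (List (Int × List (String × Int))) × Int :=
  ([(18, [("total_fixtures", 6)]), (1, [("total_fixtures", 3)])], 10)

def Spec_identify_blank_gameweeks_py (fixture_analysis : List (Int × List (String × Int))) (current_gw : Int) (out : List Int) : Prop := out = identify_blank_gameweeks_py_alt fixture_analysis current_gw
instance (fixture_analysis : List (Int × List (String × Int))) (current_gw : Int) (out : List Int) : Decidable (Spec_identify_blank_gameweeks_py fixture_analysis current_gw out) := by unfold Spec_identify_blank_gameweeks_py; infer_instance

-- ===== CLAIM (what is proved, stated in full; the proofs are below) =====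
def Claim_equal_identify_blank_gameweeks_py : Prop := ∀ (fixture_analysis : List (Int × List (String × Int))) (current_gw : Int), Dom_identify_blank_gameweeks_py fixture_analysis current_gw → Pre_identify_blank_gameweeks_py fixture_analysis current_gw → Spec_identify_blank_gameweeks_py fixture_analysis current_gw (identify_blank_gameweeks_py fixture_analysis current_gw)

-- ===== LEMMAS AND PROOFS =====

-- A's selection predicate, seen per item
def pvP (cur : Int) (p : Int × List (String × Int)) : Bool :=
  decide (pvTF p.2 < 5) ||
    ((p.1 == 18 || p.1 == 28 || p.1 == 29) && decide (cur ≤ p.1) && decide (pvTF p.2 < 8))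

theorem pv_extras_mem (fa : List (Int × List (String × Int))) (cur : Int)
    (gws : List Int) (hnd : gws.Nodup) (acc : List Int) (x : Int) :
    (x ∈ gws.foldl (fun acc gw =>
        if cur ≤ gw ∧ ¬ gw ∈ acc ∧ (PySem.Dict.ofList fa).contains gw then
          (if pvLookupTF fa gw < 8 then acc ++ [gw] else acc)
        else acc) acc)
    ↔ x ∈ acc ∨ (x ∈ gws ∧ cur ≤ x ∧ (PySem.Dict.ofList fa).contains x ∧ pvLookupTF fa x < 8) := by
  induction gws generalizing acc with
  | nil => simp
  | cons g t ih =>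
    simp only [List.foldl_cons]
    rw [ih (List.Nodup.of_cons hnd)]
    have hgt : g ∉ t := (List.nodup_cons.mp hnd).1
    by_cases hx : x = g
    · subst hx
      split_ifs with h1 h2 <;>
        simp only [List.mem_append, List.mem_cons] <;>
        constructor <;> intro h <;> tauto
    · split_ifs with h1 h2 <;>
        simp only [List.mem_append, List.mem_cons] <;>
        constructor <;> intro h <;> tauto

theorem pv_extras_nodup (fa : List (Int × List (String × Int))) (cur : Int)
    (gws : List Int) (acc : List Int) (h : acc.Nodup) :
    (gws.foldl (fun acc gw =>
        if cur ≤ gw ∧ ¬ gw ∈ acc ∧ (PySem.Dict.ofList fa).contains gw then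
          (if pvLookupTF fa gw < 8 then acc ++ [gw] else acc)
        else acc) acc).Nodup := by
  induction gws generalizing acc with
  | nil => exact h
  | cons g t ih =>
    simp only [List.foldl_cons]
    apply ih
    split_ifs with h1 h2
    · simp [List.nodup_append, h]
      intro a ha hag
      exact h1.2.1 (hag ▸ ha)
    · exact h
    · exact h

-- A equals sorted(first-component of the items satisfying pvP)
theorem pv_A_eq (fa : List (Int × List (String × Int))) (cur : Int) :
    identify_blank_gameweeks_py fa cur =
      PySem.List.sorted (((PySem.Dict.ofList fa).items.filter (pvP cur)).map Prod.fst)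
        (fun x => x) false := by
  unfold identify_blank_gameweeks_py
  simp only [PySem.List.foldl_append_ite (p := fun p : Int × List (String × Int) => pvTF p.2 < 5)
    (f := Prod.fst), List.nil_append]
  have hkeys : ((PySem.Dict.ofList fa).items.map Prod.fst).Nodup := PySem.Dict.nodup_keys_ofList fa
  apply (PySem.List.sorted_id_eq_sorted_id_iff_perm _ _).mpr
  have hL5 : ((((PySem.Dict.ofList fa).items.filter
      (fun p => decide (pvTF p.2 < 5))).map Prod.fst)).Nodup :=
    hkeys.sublist (List.Sublist.map _ (List.filter_sublist (l := (PySem.Dict.ofList fa).items)))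
  have hLB : ((((PySem.Dict.ofList fa).items.filter (pvP cur)).map Prod.fst)).Nodup :=
    hkeys.sublist (List.Sublist.map _ (List.filter_sublist (l := (PySem.Dict.ofList fa).items)))
  apply (List.perm_ext_iff_of_nodup (pv_extras_nodup fa cur _ _ hL5) hLB).mpr
  intro x
  rw [pv_extras_mem fa cur _ (by decide) _ x]
  have hmem : ∀ (v : List (String × Int)), ((x, v) ∈ (PySem.Dict.ofList fa).items ↔ (PySem.Dict.ofList fa).get? x = some v) :=
    fun v => (PySem.Dict.get?_eq_some_iff_mem_items _ _ _ hkeys).symm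
  simp only [List.mem_map, List.mem_filter, pvP]
  constructor
  · rintro (⟨p, ⟨hp, hp5⟩, rfl⟩ | ⟨hxT, hcur, hcont, htf⟩)
    · exact ⟨p, ⟨hp, by simp_all⟩, rfl⟩
    · rw [PySem.Dict.contains_eq_isSome_get?] at hcont
      obtain ⟨v, hv⟩ := Option.isSome_iff_exists.mp hcont
      refine ⟨(x, v), ⟨(hmem v).mpr hv, ?_⟩, rfl⟩
      have : pvLookupTF fa x = pvTF v := by simp [pvLookupTF, hv]
      rw [this] at htf
      simp only [List.mem_cons, List.not_mem_nil, or_false] at hxT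
      simp [htf, hcur]
      rcases hxT with rfl | rfl | rfl <;> simp
  · rintro ⟨p, ⟨hp, hcond⟩, rfl⟩
    simp only [Bool.or_eq_true, Bool.and_eq_true, decide_eq_true_eq, beq_iff_eq] at hcond
    rcases hcond with h5 | ⟨⟨hT, hcur⟩, h8⟩
    · left; exact ⟨p, ⟨hp, by simp [h5]⟩, rfl⟩
    · have hv : (PySem.Dict.ofList fa).get? p.1 = some p.2 := (hmem p.2).mp (by simpa using hp)
      by_cases h5 : pvTF p.2 < 5
      · left; exact ⟨p, ⟨hp, by simp [h5]⟩, rfl⟩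
      · right
        refine ⟨by simp only [List.mem_cons]; tauto, hcur, ?_, ?_⟩
        · rw [PySem.Dict.contains_eq_isSome_get?, hv]; rfl
        · simp [pvLookupTF, hv, h8]

-- On an item of the dict, B's threshold test coincides with A's predicate pvP
theorem pv_pred_eq (fa : List (Int × List (String × Int))) (cur : Int)
    (p : Int × List (String × Int)) (hp : p ∈ (PySem.Dict.ofList fa).items) :
    decide (pvLookupTF fa p.1 < pvThreshold cur p.1) = pvP cur p := by
  have hkeys : ((PySem.Dict.ofList fa).items.map Prod.fst).Nodup := PySem.Dict.nodup_keys_ofList fa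
  have hv : (PySem.Dict.ofList fa).get? p.1 = some p.2 :=
    (PySem.Dict.get?_eq_some_iff_mem_items _ _ _ hkeys).mpr (by simpa using hp)
  have hl : pvLookupTF fa p.1 = pvTF p.2 := by simp [pvLookupTF, hv]
  unfold pvThreshold pvP
  rw [hl]
  by_cases hb : ((p.1 == 18 || p.1 == 28 || p.1 == 29) && decide (cur ≤ p.1)) = true
  · rw [if_pos hb, hb, Bool.true_and]
    by_cases h8 : pvTF p.2 < 8
    · have h8' : decide (pvTF p.2 < 8) = true := by simpa using h8
      simp [h8]
    · have h5 : ¬ pvTF p.2 < 5 := by omega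
      simp [h8, h5]
  · have hb' : ((p.1 == 18 || p.1 == 28 || p.1 == 29) && decide (cur ≤ p.1)) = false := by
      revert hb; cases ((p.1 == 18 || p.1 == 28 || p.1 == 29) && decide (cur ≤ p.1)) <;> simp
    rw [if_neg hb, hb', Bool.false_and, Bool.or_false]

theorem pv_ports_eq (fa : List (Int × List (String × Int))) (cur : Int) :
    identify_blank_gameweeks_py fa cur = identify_blank_gameweeks_py_alt fa cur := by
  rw [pv_A_eq]
  unfold identify_blank_gameweeks_py_alt
  have hkeys : ((PySem.Dict.ofList fa).keys).Nodup := PySem.Dict.nodup_keys_ofList fa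
  -- B's fold is a filter of the sorted key list
  rw [PySem.List.foldl_append_ite_eq_filter
    (p := fun gw => pvLookupTF fa gw < pvThreshold cur gw), List.nil_append]
  -- that filtered sorted list is a strictly increasing rearrangement of A's selected keys
  apply PySem.List.sorted_eq_of_perm_of_pairwise_lt
  · -- permutation
    have h1 : ((PySem.List.sorted (PySem.Dict.ofList fa).keys (fun x => x) false).filter
        (fun gw => decide (pvLookupTF fa gw < pvThreshold cur gw))).Perm
        (((PySem.Dict.ofList fa).keys).filter
          (fun gw => decide (pvLookupTF fa gw < pvThreshold cur gw))) :=
      (PySem.List.sorted_perm _ _ _).filter _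
    have h2 : ((PySem.Dict.ofList fa).keys).filter
        (fun gw => decide (pvLookupTF fa gw < pvThreshold cur gw)) =
        (((PySem.Dict.ofList fa).items.filter (pvP cur)).map Prod.fst) := by
      show ((PySem.Dict.ofList fa).items.map Prod.fst).filter _ = _
      rw [List.filter_map]
      congr 1
      apply List.filter_congr
      intro p hp
      exact pv_pred_eq fa cur p hp
    exact h2 ▸ h1
  · -- strictly increasing
    have hnd : (PySem.List.sorted (PySem.Dict.ofList fa).keys (fun x => x) false).Nodup :=
      (PySem.List.sorted_perm (PySem.Dict.ofList fa).keys (fun x => x) false).symm.nodup hkeys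
    have hle : (PySem.List.sorted (PySem.Dict.ofList fa).keys (fun x => x) false).Pairwise
        (fun a b => a ≤ b) := PySem.List.sorted_pairwise _ _
    have hlt : (PySem.List.sorted (PySem.Dict.ofList fa).keys (fun x => x) false).Pairwise
        (fun a b => a < b) := (hle.and hnd).imp (fun h => lt_of_le_of_ne h.1 h.2)
    exact hlt.filter _

-- ===== VERDICT (by name: the statement is the Claim_ definition above) =====
theorem identify_blank_gameweeks_py_spec : Claim_equal_identify_blank_gameweeks_py :=
  fun fixture_analysis current_gw _ _ => pv_ports_eq fixture_analysis current_gw
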